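-- pv_equiv track=rewrite | github.com/DansiDanutz/MyWork-AI | projects/marketplace/backend/services/brain_ingest.py | _prioritize_files
-- ===== SOURCE A (Python) =====
-- from typing import Iterable, Optional
--
-- def _prioritize_files(paths: Iterable[str]) -> list[str]:
--     priority = []
--     secondary = []
--     for path in paths:
--         lowered = path.lower()
--         if "readme" in lowered or lowered.endswith((".md", ".mdx")):
--             priority.append(path)
--         elif "/src/" in lowered or "/app/" in lowered or "/backend/" in lowered or "/frontend/" in lowered:
--             priority.append(path)
--         else:
--             secondary.append(path)
--     return priority + secondary
-- ===== SOURCE B (Python) =====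
-- def _prioritize_files(paths):
--     def sort_key(path):
--         lowered = path.lower()
--         if ("readme" in lowered or lowered.endswith((".md", ".mdx"))
--                 or "/src/" in lowered or "/app/" in lowered
--                 or "/backend/" in lowered or "/frontend/" in lowered):
--             return 0
--         return 1
--     return sorted(paths, key=sort_key)
-- ===== Notes on version B (the rewrite author's own statement) =====
-- stated objective: simpler
-- what changed: Replaces the two-accumulator partition loop with a single stable sort on a 0/1 priority key, relying on sort stability to keep within-bucket order.
import Mathlib
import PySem

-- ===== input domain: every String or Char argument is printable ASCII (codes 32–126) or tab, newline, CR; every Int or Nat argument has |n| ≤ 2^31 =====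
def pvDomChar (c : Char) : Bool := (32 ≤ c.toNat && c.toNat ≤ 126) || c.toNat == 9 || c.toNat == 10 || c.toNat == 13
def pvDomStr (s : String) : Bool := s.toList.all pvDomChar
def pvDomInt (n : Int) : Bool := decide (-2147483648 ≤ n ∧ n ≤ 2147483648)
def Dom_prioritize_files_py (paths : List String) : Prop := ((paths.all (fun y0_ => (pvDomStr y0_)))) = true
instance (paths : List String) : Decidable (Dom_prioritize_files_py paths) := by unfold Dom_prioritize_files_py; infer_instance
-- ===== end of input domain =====

-- B replaces A's two-accumulator partition loop by ONE stable sort on a 0/1 priority key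
-- (objective: simpler — sort stability preserves within-bucket order).

-- ===== PORT A =====
-- "readme" in lowered or lowered.endswith((".md", ".mdx"))
def pvCond1 (lowered : List Char) : Bool :=
  PySem.Chars.isIn "readme".toList lowered
    || (PySem.Chars.endswith lowered ".md".toList || PySem.Chars.endswith lowered ".mdx".toList)

-- "/src/" in lowered or "/app/" in lowered or "/backend/" in lowered or "/frontend/" in lowered
def pvCond2 (lowered : List Char) : Bool :=
  PySem.Chars.isIn "/src/".toList lowered || PySem.Chars.isIn "/app/".toList lowered
    || PySem.Chars.isIn "/backend/".toList lowered || PySem.Chars.isIn "/frontend/".toList lowered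

-- A's loop over paths with the two accumulators priority, secondary; returns priority + secondary
def prioritize_files_py_go (paths priority secondary : List String) : List String :=
  match paths with
  | [] => priority ++ secondary
  | path :: rest =>
    let lowered := PySem.Chars.lower path.toList
    if pvCond1 lowered then
      prioritize_files_py_go rest (priority ++ [path]) secondary
    else if pvCond2 lowered then
      prioritize_files_py_go rest (priority ++ [path]) secondary
    else
      prioritize_files_py_go rest priority (secondary ++ [path])

def prioritize_files_py (paths : List String) : List String :=
  prioritize_files_py_go paths [] []

-- ===== PORT B =====
-- sort_key(path): 0 if the path is priority, else 1 (lowers once per call)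
def pvSortKey (path : String) : Int :=
  let lowered := PySem.Chars.lower path.toList
  if pvCond1 lowered || pvCond2 lowered then 0 else 1

-- sorted(paths, key=sort_key): stable
def prioritize_files_py_alt (paths : List String) : List String :=
  PySem.List.sorted paths pvSortKey false

-- ===== PRECONDITION & SPEC =====
def Spec_prioritize_files_py (paths : List String) (out : List String) : Prop := out = prioritize_files_py_alt paths
instance (paths : List String) (out : List String) : Decidable (Spec_prioritize_files_py paths out) := by unfold Spec_prioritize_files_py; infer_instance

-- ===== CLAIM (what is proved, stated in full; the proofs are below) =====
def Claim_equal_prioritize_files_py : Prop := ∀ (paths : List String), Dom_prioritize_files_py paths → Spec_prioritize_files_py paths (prioritize_files_py paths)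

-- ===== LEMMAS AND PROOFS =====

-- inserting a priority element (key 0) into "priorities ++ secondaries" puts it after the priorities
theorem pv_insert_prio (x : String) (P S : List String)
    (hP : ∀ y ∈ P, pvSortKey y = 0) (hS : ∀ y ∈ S, pvSortKey y = 1)
    (hx : pvSortKey x = 0) :
    PySem.List.insertBy (fun a b => decide (pvSortKey a < pvSortKey b)) x (P ++ S)
      = P ++ x :: S := by
  induction P with
  | nil =>
    cases S with
    | nil => rfl
    | cons s t =>
      simp only [List.nil_append, PySem.List.insertBy]
      rw [hx, hS s (by simp)]
      simp
  | cons p P ih =>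
    simp only [List.cons_append, PySem.List.insertBy]
    rw [hx, hP p (by simp)]
    simp only [decide_eq_true_eq]
    rw [if_neg (by omega)]
    rw [ih (fun y hy => hP y (by simp [hy]))]

-- inserting a secondary element (key 1) appends it at the end
theorem pv_insert_sec (x : String) (acc : List String)
    (hk : ∀ y ∈ acc, pvSortKey y = 0 ∨ pvSortKey y = 1)
    (hx : pvSortKey x = 1) :
    PySem.List.insertBy (fun a b => decide (pvSortKey a < pvSortKey b)) x acc
      = acc ++ [x] := by
  apply PySem.List.insertBy_of_forall_not_before
  intro y hy
  rcases hk y hy with h | h <;> simp [hx, h]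

-- the key of a path, unfolded against A's two conditions
theorem pvSortKey_eq (path : String) :
    pvSortKey path
      = (if pvCond1 (PySem.Chars.lower path.toList) || pvCond2 (PySem.Chars.lower path.toList)
         then (0 : Int) else 1) := rfl

-- loop invariant: A's loop from state (P, S) equals continuing B's insertion fold from P ++ S
theorem pv_invariant (paths : List String) :
    ∀ (P S : List String),
      (∀ y ∈ P, pvSortKey y = 0) → (∀ y ∈ S, pvSortKey y = 1) →
      prioritize_files_py_go paths P S
        = paths.foldl
            (fun acc x => PySem.List.insertBy (fun a b => decide (pvSortKey a < pvSortKey b)) x acc)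
            (P ++ S) := by
  induction paths with
  | nil => intro P S _ _; rfl
  | cons path rest ih =>
    intro P S hP hS
    simp only [prioritize_files_py_go, List.foldl_cons]
    by_cases h1 : pvCond1 (PySem.Chars.lower path.toList)
    · have hk : pvSortKey path = 0 := by rw [pvSortKey_eq, if_pos (by simp [h1])]
      rw [if_pos h1, pv_insert_prio path P S hP hS hk,
        show P ++ path :: S = (P ++ [path]) ++ S by simp]
      exact ih (P ++ [path]) S
        (by intro y hy; rcases List.mem_append.mp hy with h | h
            · exact hP y h
            · simp at h; subst h; exact hk) hS
    · rw [if_neg h1]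
      by_cases h2 : pvCond2 (PySem.Chars.lower path.toList)
      · have hk : pvSortKey path = 0 := by rw [pvSortKey_eq, if_pos (by simp [h2])]
        rw [if_pos h2, pv_insert_prio path P S hP hS hk,
          show P ++ path :: S = (P ++ [path]) ++ S by simp]
        exact ih (P ++ [path]) S
          (by intro y hy; rcases List.mem_append.mp hy with h | h
              · exact hP y h
              · simp at h; subst h; exact hk) hS
      · have hk : pvSortKey path = 1 := by rw [pvSortKey_eq, if_neg (by simp [h1, h2])]
        rw [if_neg h2,
          pv_insert_sec path (P ++ S)
            (by intro y hy; rcases List.mem_append.mp hy with h | h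
                · exact Or.inl (hP y h)
                · exact Or.inr (hS y h)) hk,
          show (P ++ S) ++ [path] = P ++ (S ++ [path]) by simp]
        exact ih P (S ++ [path]) hP
          (by intro y hy; rcases List.mem_append.mp hy with h | h
              · exact hS y h
              · simp at h; subst h; exact hk)

-- ===== VERDICT (by name: the statement is the Claim_ definition above) =====
theorem prioritize_files_py_spec : Claim_equal_prioritize_files_py := by
  intro paths _
  show prioritize_files_py paths = prioritize_files_py_alt paths
  rw [prioritize_files_py, prioritize_files_py_alt,
    PySem.List.sorted_eq_foldl_insertBy paths pvSortKey,
    pv_invariant paths [] [] (by simp) (by simp)]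
  rfl
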